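-- pv_equiv track=rewrite | github.com/ganukov/SoftUni | Fundamentals/String_Processing/char_multiplier.py | sum_func
-- ===== SOURCE A (Python) =====
-- def sum_func(firs_word, second_word):
--     total_sum = 0
--
--     for i in range(len(firs_word)):
--         if i < len(second_word):
--             total_sum += ord(firs_word[i]) * ord(second_word[i])
--         else:
--             total_sum += ord(firs_word[i])
--
--     return total_sum
-- ===== SOURCE B (Python) =====
-- def sum_func(firs_word, second_word):
--     # Algebraic rearrangement: ord(a)*ord(b) = ord(a) + ord(a)*(ord(b)-1),
--     # so start from the ord-sum of the WHOLE first word and add a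
--     # multiplicative correction over the overlap with the second word.
--     total = sum(map(ord, firs_word))
--     for a, b in zip(firs_word, second_word):
--         total += ord(a) * (ord(b) - 1)
--     return total
-- ===== Notes on version B (the rewrite author's own statement) =====
-- stated objective: alternative
-- what changed: Replaces the branched indexed loop by an algebraic rearrangement: compute the ord-sum of the entire first word in one branchless pass, then add the multiplicative correction ord(a)*(ord(b)-1) over the zip-truncated overlap, using a*b = a + a*(b-1); no overlap/tail partition and no per-index branch.
import Mathlib
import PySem

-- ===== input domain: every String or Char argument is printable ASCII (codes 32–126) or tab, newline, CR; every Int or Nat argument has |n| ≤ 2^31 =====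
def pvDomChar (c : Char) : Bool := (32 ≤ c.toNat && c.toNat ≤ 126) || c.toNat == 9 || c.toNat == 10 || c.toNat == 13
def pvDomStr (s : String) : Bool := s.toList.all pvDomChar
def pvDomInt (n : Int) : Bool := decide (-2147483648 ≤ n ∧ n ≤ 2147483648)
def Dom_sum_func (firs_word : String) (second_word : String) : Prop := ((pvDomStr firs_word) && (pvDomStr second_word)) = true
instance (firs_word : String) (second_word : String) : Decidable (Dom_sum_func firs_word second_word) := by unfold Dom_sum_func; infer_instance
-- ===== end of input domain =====

-- B replaces the branched indexed loop by the rearrangement a*b = a + a*(b-1):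
-- one full ord-sum of the first word plus a multiplicative correction over the overlap.

-- ===== PORT A =====
-- for i in range(len(firs_word)): if i < len(second_word): acc += ord(f[i])*ord(s[i]) else: acc += ord(f[i])
def sum_func (firs_word : String) (second_word : String) : Int :=
  (List.range firs_word.toList.length).foldl (fun total_sum i =>
    if i < second_word.toList.length then
      total_sum + (firs_word.toList.getD i ' ').toNat * (second_word.toList.getD i ' ').toNat
    else
      total_sum + (firs_word.toList.getD i ' ').toNat) 0

-- ===== PORT B =====
-- total = sum(map(ord, firs_word)); for a,b in zip(f,s): total += ord(a)*(ord(b)-1)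
def sum_func_alt (firs_word : String) (second_word : String) : Int :=
  (firs_word.toList.zip second_word.toList).foldl
    (fun total p => total + (p.1.toNat : Int) * ((p.2.toNat : Int) - 1))
    ((firs_word.toList.map (fun c => (c.toNat : Int))).sum)

-- ===== PRECONDITION & SPEC =====
def Spec_sum_func (firs_word : String) (second_word : String) (out : Int) : Prop := out = sum_func_alt firs_word second_word
instance (firs_word : String) (second_word : String) (out : Int) : Decidable (Spec_sum_func firs_word second_word out) := by unfold Spec_sum_func; infer_instance

-- ===== CLAIM (what is proved, stated in full; the proofs are below) =====
def Claim_equal_sum_func : Prop := ∀ (firs_word : String) (second_word : String), Dom_sum_func firs_word second_word → Spec_sum_func firs_word second_word (sum_func firs_word second_word)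

-- ===== LEMMAS AND PROOFS =====

theorem sum_func_key (l1 l2 : List Char) :
    ((List.range l1.length).map (fun i =>
        if i < l2.length then ((l1.getD i ' ').toNat * (l2.getD i ' ').toNat : Int)
        else ((l1.getD i ' ').toNat : Int))).sum
    = (l1.map (fun c => (c.toNat : Int))).sum
      + ((l1.zip l2).map (fun p => (p.1.toNat : Int) * ((p.2.toNat : Int) - 1))).sum := by
  induction l1 generalizing l2 with
  | nil => simp
  | cons c t ih =>
    rw [List.length_cons, List.range_succ_eq_map, List.map_cons, List.map_map, List.sum_cons]
    simp only [Function.comp_def, Nat.succ_eq_add_one, List.getD_cons_succ, List.getD_cons_zero]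
    cases l2 with
    | nil =>
      simp only [List.length_nil, Nat.not_lt_zero, if_false, List.zip_nil_right,
        List.map_nil, List.sum_nil, List.map_cons, List.sum_cons, add_zero]
      have h := ih ([] : List Char)
      simp only [List.length_nil, Nat.not_lt_zero, if_false, List.zip_nil_right,
        List.map_nil, List.sum_nil, add_zero] at h
      rw [h]
    | cons d u =>
      simp only [List.length_cons, Nat.zero_lt_succ, if_true, Nat.add_lt_add_iff_right,
        List.getD_cons_succ, List.getD_cons_zero,
        List.zip_cons_cons, List.map_cons, List.sum_cons]
      rw [ih u]
      push_cast
      ring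

-- ===== VERDICT (by name: the statement is the Claim_ definition above) =====
theorem sum_func_spec : Claim_equal_sum_func := by
  intro f s _
  show sum_func f s = sum_func_alt f s
  unfold sum_func sum_func_alt
  have hA : (fun (total_sum : Int) (i : Nat) =>
      if i < s.toList.length then
        total_sum + (f.toList.getD i ' ').toNat * (s.toList.getD i ' ').toNat
      else
        total_sum + (f.toList.getD i ' ').toNat)
      = fun (total_sum : Int) (i : Nat) => total_sum +
          (if i < s.toList.length then
            ((f.toList.getD i ' ').toNat * (s.toList.getD i ' ').toNat : Int)
          else ((f.toList.getD i ' ').toNat : Int)) := by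
    funext a i; split <;> ring
  rw [hA, PySem.List.foldl_add, PySem.List.foldl_add, zero_add, sum_func_key]
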